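-- pv_equiv track=rewrite | github.com/BillBongPeng/csv_analysis | qt-nocomments.py | counts_of_c21c18c13
-- ===== SOURCE A (Python) =====
-- def counts_of_c21c18c13(counts):
-- 	c21list = []
-- 	c18list = []
-- 	c13list = []
-- 	i = 0
-- 	try:
-- 		while i<len(counts):
-- 			c21list.append(counts[i])
-- 			c18list.append(counts[i+1])
-- 			c13list.append(counts[i+2])
-- 			i+=3
-- 	except IndexError:
-- 			pass
-- 	c21 = sum(c21list)
-- 	c18 = sum(c18list)
-- 	c13 = sum(c13list)
-- 	c21c18c13list = [c21,c18,c13]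
-- 	return c21c18c13list
-- ===== SOURCE B (Python) =====
-- def counts_of_c21c18c13(counts):
-- 	sums = [0, 0, 0]
-- 	for idx, value in enumerate(counts):
-- 		sums[idx % 3] += value
-- 	return sums
-- ===== Notes on version B (the rewrite author's own statement) =====
-- stated objective: simpler
-- what changed: Replaces the three-at-a-time index stepping with three auxiliary lists, an IndexError-swallowing try/except and three final sums by a single flat enumerate pass that adds each element into a fixed three-slot accumulator at position idx mod 3.
import Mathlib
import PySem

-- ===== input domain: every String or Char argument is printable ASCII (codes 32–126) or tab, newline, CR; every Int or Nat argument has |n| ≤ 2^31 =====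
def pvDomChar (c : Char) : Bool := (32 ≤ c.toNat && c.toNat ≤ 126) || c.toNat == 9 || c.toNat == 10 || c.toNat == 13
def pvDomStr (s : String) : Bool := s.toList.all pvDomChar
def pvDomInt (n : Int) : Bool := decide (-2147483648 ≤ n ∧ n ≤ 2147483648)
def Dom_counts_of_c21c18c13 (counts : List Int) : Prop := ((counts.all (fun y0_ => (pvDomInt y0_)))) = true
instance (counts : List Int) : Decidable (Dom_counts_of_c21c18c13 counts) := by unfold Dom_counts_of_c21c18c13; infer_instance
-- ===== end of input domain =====

-- B replaces A's three-at-a-time stepping / three lists / try-except / three sums by one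
-- enumerate pass adding into a fixed [0,0,0] accumulator at idx%3 (objective: simpler).

-- ===== PORT A =====
-- A's while loop with try/except IndexError: the loop index i is always ≥ 0, so counts[i]
-- is ported via the safe getElem? (= PySem.List.pyGet? on nonnegative indices); a `none`
-- is exactly Python's IndexError, which A's except swallows, keeping the lists built so far.
-- counts[i] inside the `i < len(counts)` guard always succeeds, so it is a direct getElem.
def pvLoopA (counts : List Int) (i : Nat) (l1 l2 l3 : List Int) :
    List Int × List Int × List Int :=
  if h : i < counts.length then
    let l1' := l1 ++ [counts[i]]
    match counts[i+1]? with
    | none => (l1', l2, l3)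
    | some b =>
      let l2' := l2 ++ [b]
      match counts[i+2]? with
      | none => (l1', l2', l3)
      | some c => pvLoopA counts (i+3) l1' l2' (l3 ++ [c])
  else (l1, l2, l3)
termination_by counts.length - i

def counts_of_c21c18c13 (counts : List Int) : List Int :=
  let r := pvLoopA counts 0 [] [] []
  [r.1.sum, r.2.1.sum, r.2.2.sum]

-- ===== PORT B =====
-- one fold step: sums[idx % 3] += value  (idx from enumerate, always ≥ 0; sums has length 3)
def pvBStep (acc : List Int) (p : Int × Int) : List Int :=
  let j := (PySem.Int.mod p.1 3).toNat
  acc.set j (acc.getD j 0 + p.2)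

def counts_of_c21c18c13_alt (counts : List Int) : List Int :=
  (PySem.List.enumerate counts).foldl pvBStep [0, 0, 0]

-- ===== PRECONDITION & SPEC =====
def Spec_counts_of_c21c18c13 (counts : List Int) (out : List Int) : Prop := out = counts_of_c21c18c13_alt counts
instance (counts : List Int) (out : List Int) : Decidable (Spec_counts_of_c21c18c13 counts out) := by unfold Spec_counts_of_c21c18c13; infer_instance

-- ===== CLAIM (what is proved, stated in full; the proofs are below) =====
def Claim_equal_counts_of_c21c18c13 : Prop := ∀ (counts : List Int), Dom_counts_of_c21c18c13 counts → Spec_counts_of_c21c18c13 counts (counts_of_c21c18c13 counts)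

-- ===== LEMMAS AND PROOFS =====

-- position-mod-3 buckets of a list, three elements at a time (proof-only helper)
def pvBuckets : List Int → List Int × List Int × List Int
  | [] => ([], [], [])
  | [a] => ([a], [], [])
  | [a, b] => ([a], [b], [])
  | a :: b :: c :: r =>
      let (u, v, w) := pvBuckets r
      (a :: u, b :: v, c :: w)

theorem pvLoopA_eq (counts : List Int) (i : Nat) (l1 l2 l3 : List Int) :
    pvLoopA counts i l1 l2 l3 =
      (l1 ++ (pvBuckets (counts.drop i)).1,
       l2 ++ (pvBuckets (counts.drop i)).2.1,
       l3 ++ (pvBuckets (counts.drop i)).2.2) := by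
  induction i, l1, l2, l3 using pvLoopA.induct (counts := counts) with
  | case1 i l1 l2 l3 h hb =>
      have hlen : counts.length = i + 1 := by
        have := List.getElem?_eq_none_iff.mp hb; omega
      have hdrop : counts.drop i = [counts[i]] := by
        rw [List.drop_eq_getElem_cons h]
        simp [List.drop_eq_nil_of_le (by omega : counts.length ≤ i + 1)]
      simp [pvLoopA, h, hb, hdrop, pvBuckets]
  | case2 i l1 l2 l3 h b hb hc =>
      have hlen : counts.length = i + 2 := by
        have h1 : counts.length ≤ i + 2 := List.getElem?_eq_none_iff.mp hc
        have h2 : i + 1 < counts.length := (List.getElem?_eq_some_iff.mp hb).choose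
        omega
      have hi1 : i + 1 < counts.length := by omega
      have hdrop : counts.drop i = [counts[i], b] := by
        rw [List.drop_eq_getElem_cons h, List.drop_eq_getElem_cons hi1]
        have : counts[i+1] = b := by
          have := List.getElem?_eq_some_iff.mp hb
          exact this.choose_spec ▸ rfl
        rw [this]
        simp [List.drop_eq_nil_of_le (by omega : counts.length ≤ i + 2)]
      simp [pvLoopA, h, hb, hc, hdrop, pvBuckets]
  | case3 i l1 l2 l3 h l1p b hb l2p c hc ih =>
      have hi1 : i + 1 < counts.length := (List.getElem?_eq_some_iff.mp hb).choose
      have hi2 : i + 2 < counts.length := (List.getElem?_eq_some_iff.mp hc).choose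
      have hb' : counts[i+1] = b := by
        have := List.getElem?_eq_some_iff.mp hb
        exact this.choose_spec ▸ rfl
      have hc' : counts[i+2] = c := by
        have := List.getElem?_eq_some_iff.mp hc
        exact this.choose_spec ▸ rfl
      have hdrop : counts.drop i = counts[i] :: b :: c :: counts.drop (i+3) := by
        rw [List.drop_eq_getElem_cons h, List.drop_eq_getElem_cons hi1,
            List.drop_eq_getElem_cons hi2, hb', hc']
      rw [pvLoopA]
      simp only [h, dite_true, hb, hc]
      rw [ih, hdrop]
      simp [pvBuckets, l1p, l2p]
  | case4 i l1 l2 l3 h =>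
      have hdrop : counts.drop i = [] :=
        List.drop_eq_nil_of_le (by omega)
      simp [pvLoopA, h, hdrop, pvBuckets]

-- shifting the enumerate start by 3 does not change the fold (pvBStep reads idx only mod 3)
theorem pvFold_shift (xs : List Int) (s : Int) (acc : List Int) :
    (PySem.List.enumerate xs (s + 3)).foldl pvBStep acc =
      (PySem.List.enumerate xs s).foldl pvBStep acc := by
  induction xs generalizing s acc with
  | nil => simp [PySem.List.enumerate_nil]
  | cons x xs ih =>
      rw [PySem.List.enumerate_cons, PySem.List.enumerate_cons]
      simp only [List.foldl_cons]
      have hm : PySem.Int.mod (s + 3) 3 = PySem.Int.mod s 3 := by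
        rw [PySem.Int.mod_eq_emod_of_pos (by norm_num),
            PySem.Int.mod_eq_emod_of_pos (by norm_num)]
        omega
      have hstep : pvBStep acc (s + 3, x) = pvBStep acc (s, x) := by
        simp only [pvBStep, hm]
      rw [hstep]
      have : s + 3 + 1 = s + 1 + 3 := by ring
      rw [this, ih]

theorem pvFold_buckets (xs : List Int) (x y z : Int) :
    (PySem.List.enumerate xs 0).foldl pvBStep [x, y, z] =
      [x + (pvBuckets xs).1.sum, y + (pvBuckets xs).2.1.sum, z + (pvBuckets xs).2.2.sum] := by
  induction xs using pvBuckets.induct generalizing x y z with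
  | case1 => simp [PySem.List.enumerate_nil, pvBuckets]
  | case2 a =>
      simp [PySem.List.enumerate_cons, PySem.List.enumerate_nil, pvBuckets, pvBStep,
        PySem.Int.mod]
  | case3 a b =>
      simp [PySem.List.enumerate_cons, PySem.List.enumerate_nil, pvBuckets, pvBStep,
        PySem.Int.mod]
  | case4 a b c r u v w heq ih =>
      rw [PySem.List.enumerate_cons, PySem.List.enumerate_cons, PySem.List.enumerate_cons]
      simp only [List.foldl_cons]
      have h0 : pvBStep [x, y, z] (0, a) = [x + a, y, z] := by
        simp [pvBStep, PySem.Int.mod]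
      have h1 : pvBStep [x + a, y, z] (0 + 1, b) = [x + a, y + b, z] := by
        simp [pvBStep, PySem.Int.mod]
      have h2 : pvBStep [x + a, y + b, z] (0 + 1 + 1, c) = [x + a, y + b, z + c] := by
        simp [pvBStep, PySem.Int.mod]
      rw [h0, h1, h2]
      have hsh : (0 : Int) + 1 + 1 + 1 = 0 + 3 := by ring
      rw [hsh, pvFold_shift, ih]
      simp [pvBuckets, heq]
      refine ⟨by ring, by ring, by ring⟩

-- ===== VERDICT (by name: the statement is the Claim_ definition above) =====
theorem counts_of_c21c18c13_spec : Claim_equal_counts_of_c21c18c13 := by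
  intro counts _
  unfold Spec_counts_of_c21c18c13 counts_of_c21c18c13 counts_of_c21c18c13_alt
  rw [pvLoopA_eq, pvFold_buckets]
  simp
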